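-- pv_equiv track=rewrite | github.com/msslotboom/tiralabra | src/heuristic.py | _get_lowering_diagonal_sequences
-- ===== SOURCE A (Python) =====
-- def _get_lowering_diagonal_sequences(table):
--     all_lowering_diagonal_sequences = []
--     for starting_row_index in range(len(table)-4, -1, -1):
--         diagonal_sequence = []
--         column_index = 0
--         for row_index in range(starting_row_index, len(table)):
--             diagonal_sequence.append(table[row_index][column_index])
--             column_index += 1
--         all_lowering_diagonal_sequences.append(diagonal_sequence)
--     for starting_column_index in range(1,  len(table[0])-3):
--         diagonal_sequence = []
--         row_index = 0
--         for column_index in range(starting_column_index, len(table[0])):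
--             diagonal_sequence.append(table[row_index][column_index])
--             row_index += 1
--         all_lowering_diagonal_sequences.append(diagonal_sequence)
--     return all_lowering_diagonal_sequences
-- ===== SOURCE B (Python) =====
-- def _get_lowering_diagonal_sequences(table):
--     buckets = {}
--     for row_index, row in enumerate(table):
--         for column_index, value in enumerate(row):
--             buckets.setdefault(row_index - column_index, []).append(value)
--     return [buckets[d] for d in range(len(table) - 4, 3 - len(table[0]), -1)]
-- ===== Notes on version B (the rewrite author's own statement) =====
-- stated objective: alternative
-- what changed: Replaces the two families of per-diagonal index-walking loops by a single row-major pass that appends every cell to a dict bucket keyed by row-column, then reads the buckets off in one diagonal-offset range.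
import Mathlib
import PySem

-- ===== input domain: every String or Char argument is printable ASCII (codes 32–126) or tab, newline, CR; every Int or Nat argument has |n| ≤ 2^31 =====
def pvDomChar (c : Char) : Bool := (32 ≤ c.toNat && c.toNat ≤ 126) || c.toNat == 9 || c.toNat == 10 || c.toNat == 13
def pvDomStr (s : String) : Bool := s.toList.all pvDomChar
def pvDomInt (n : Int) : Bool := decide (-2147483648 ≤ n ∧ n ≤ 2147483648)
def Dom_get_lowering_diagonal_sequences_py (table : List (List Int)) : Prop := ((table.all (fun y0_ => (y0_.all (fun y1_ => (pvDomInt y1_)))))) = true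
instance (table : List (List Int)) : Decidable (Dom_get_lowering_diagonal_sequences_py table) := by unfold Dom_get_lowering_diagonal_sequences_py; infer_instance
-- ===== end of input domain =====

-- B replaces A's per-diagonal index-walking loops by one row-major pass grouping cells into
-- dict buckets keyed by row-column (an alternative decomposition, same asymptotic cost).


-- ===== PORT A =====
-- literal transliteration: two loops over starting indices, each walking one diagonal with an
-- explicit secondary counter (st.2), exactly as the Python does; the second loop folds from the
-- first loop's accumulator.  len(table[0]) is pyGetD table 0 (Pre_ excludes the empty table,
-- where Python raises IndexError), element reads are pyGetD (Pre_ excludes out-of-range walks).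
def get_lowering_diagonal_sequences_py (table : List (List Int)) : List (List Int) :=
  (PySem.List.pyRange 1 (((PySem.List.pyGetD table 0 []).length : Int) - 3) 1).foldl
    (fun all sc =>
      all ++ [((PySem.List.pyRange sc ((PySem.List.pyGetD table 0 []).length : Int) 1).foldl
        (fun st c =>
          (st.1 ++ [PySem.List.pyGetD (PySem.List.pyGetD table st.2 []) c 0], st.2 + 1))
        ([], 0)).1])
    ((PySem.List.pyRange ((table.length : Int) - 4) (-1) (-1)).foldl
      (fun all s =>
        all ++ [((PySem.List.pyRange s (table.length : Int) 1).foldl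
          (fun st r =>
            (st.1 ++ [PySem.List.pyGetD (PySem.List.pyGetD table r []) st.2 0], st.2 + 1))
          ([], 0)).1])
      [])

-- ===== PORT B =====
-- literal transliteration of Source B: one nested enumerate pass filling dict buckets keyed by
-- row-column (setdefault(d, []).append(v) is Dict.modify d [] (· ++ [v])), then one lookup per
-- diagonal offset; buckets[d] raises KeyError only outside Pre_, ported as getD with default [].
def get_lowering_diagonal_sequences_py_alt (table : List (List Int)) : List (List Int) :=
  (PySem.List.pyRange ((table.length : Int) - 4)
      (3 - ((PySem.List.pyGetD table 0 []).length : Int)) (-1)).map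
    (fun d =>
      ((PySem.List.enumerate table 0).foldl
        (fun b p =>
          (PySem.List.enumerate p.2 0).foldl
            (fun b q => b.modify (p.1 - q.1) [] (fun l => l ++ [q.2])) b)
        PySem.Dict.empty).getD d [])

-- ===== PRECONDITION & SPEC =====
-- Pre_ excludes: the empty table (A raises IndexError on table[0]); rectangular shapes on
-- which one of A's diagonal walks steps outside the table (A raises IndexError there; on
-- rectangular tables Pre_ is exactly A's no-raise condition); and ragged (non-rectangular)
-- tables large enough to hold a diagonal, on which A's targeted index walks read a different
-- set of cells than a whole-table scan does, so A's values there are an artefact of its access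
-- pattern (degenerate tables with no diagonal at all are admitted even when ragged).
def Pre_get_lowering_diagonal_sequences_py (table : List (List Int)) : Prop :=
  table ≠ [] ∧
  ((table.length ≤ 3 ∧ (table.headD []).length ≤ 4) ∨
   ((∀ row ∈ table, row.length = (table.headD []).length) ∧
    (4 ≤ table.length → table.length ≤ (table.headD []).length) ∧
    (5 ≤ (table.headD []).length → (table.headD []).length ≤ table.length + 1)))
instance (table : List (List Int)) : Decidable (Pre_get_lowering_diagonal_sequences_py table) := by
  unfold Pre_get_lowering_diagonal_sequences_py; infer_instance

def pvWitness_get_lowering_diagonal_sequences_py : List (List Int) :=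
  [[1, 2, 3, 4], [5, 6, 7, 8], [9, 10, 11, 12], [13, 14, 15, 16]]

def Spec_get_lowering_diagonal_sequences_py (table : List (List Int)) (out : List (List Int)) : Prop := out = get_lowering_diagonal_sequences_py_alt table
instance (table : List (List Int)) (out : List (List Int)) : Decidable (Spec_get_lowering_diagonal_sequences_py table out) := by unfold Spec_get_lowering_diagonal_sequences_py; infer_instance

-- ===== CLAIM (what is proved, stated in full; the proofs are below) =====
def Claim_equal_get_lowering_diagonal_sequences_py : Prop := ∀ (table : List (List Int)), Dom_get_lowering_diagonal_sequences_py table → Pre_get_lowering_diagonal_sequences_py table → Spec_get_lowering_diagonal_sequences_py table (get_lowering_diagonal_sequences_py table)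

-- ===== LEMMAS AND PROOFS =====

-- common normal form: the lowering diagonal reading column c of row 0 of rows, c+1 of row 1, …
def diagRows (rows : List (List Int)) (c : Nat) : List Int :=
  match rows with
  | [] => []
  | row :: rest => row.getD c 0 :: diagRows rest (c + 1)

-- diagonal of offset d collected structurally over rows whose first index is i
def pvDiagAux (rows : List (List Int)) (i d : Int) : List Int :=
  match rows with
  | [] => []
  | row :: rest =>
    (if 0 ≤ i - d ∧ i - d < (row.length : Int) then [row.getD (i - d).toNat 0] else []) ++
      pvDiagAux rest (i + 1) d

-- the table flattened to (diagonal-key, value) cells in row-major order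
def pvCells (rows : List (List Int)) (i : Int) : List (Int × Int) :=
  match rows with
  | [] => []
  | row :: rest =>
    (PySem.List.enumerate row 0).map (fun q => (i - q.1, q.2)) ++ pvCells rest (i + 1)

lemma foldl_counter (g : Int → Int → Int) (b : Int) :
    ∀ (L : Nat) (a : Int) (acc : List Int) (c : Int), (b - a).toNat = L →
      (PySem.List.pyRange a b 1).foldl
          (fun st r => (st.1 ++ [g r st.2], st.2 + 1)) (acc, c)
        = (acc ++ (PySem.List.pyRange a b 1).map (fun r => g r (c + (r - a))),
           c + ((b - a).toNat : Int)) := by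
  intro L
  induction L with
  | zero =>
    intro a acc c h
    rw [PySem.List.pyRange_one_eq_nil (by omega)]
    simp; omega
  | succ L ih =>
    intro a acc c h
    rw [PySem.List.pyRange_one_cons (by omega)]
    simp only [List.foldl_cons, List.map_cons]
    rw [ih (a + 1) (acc ++ [g a c]) (c + 1) (by omega)]
    apply Prod.ext
    · have hc : c + (a - a) = c := by omega
      have hm : List.map (fun r => g r (c + 1 + (r - (a + 1)))) (PySem.List.pyRange (a + 1) b 1)
          = List.map (fun r => g r (c + (r - a))) (PySem.List.pyRange (a + 1) b 1) := by
        apply List.map_congr_left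
        intro x hx
        rw [PySem.List.mem_pyRange_one] at hx
        congr 1; omega
      rw [hc, hm, List.append_assoc, List.singleton_append]
    · simp; omega

lemma range_diag :
    ∀ (t : List (List Int)) (c : Nat),
      (List.range t.length).map (fun k => (t.getD k []).getD (c + k) 0) = diagRows t c := by
  intro t
  induction t with
  | nil => intro c; simp [diagRows]
  | cons row rest ih =>
    intro c
    simp only [List.length_cons, List.range_succ_eq_map, List.map_cons, List.map_map]
    rw [show diagRows (row :: rest) c = row.getD c 0 :: diagRows rest (c + 1) from rfl]
    refine List.cons_eq_cons.mpr ⟨by simp, ?_⟩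
    rw [← ih (c + 1)]
    apply List.map_congr_left
    intro k hk
    simp only [Function.comp_apply, List.getD_cons_succ]
    rw [show c + Nat.succ k = c + 1 + k from by omega]

lemma buckets_eq :
    ∀ (rows : List (List Int)) (i : Int) (b : PySem.Dict Int (List Int)),
      (PySem.List.enumerate rows i).foldl
          (fun b p =>
            (PySem.List.enumerate p.2 0).foldl
              (fun b q => b.modify (p.1 - q.1) [] (fun l => l ++ [q.2])) b) b
        = (pvCells rows i).foldl (fun b p => b.modify p.1 [] (fun l => l ++ [p.2])) b := by
  intro rows
  induction rows with
  | nil => intro i b; simp [pvCells, PySem.List.enumerate_nil]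
  | cons row rest ih =>
    intro i b
    rw [PySem.List.enumerate_cons]
    simp only [List.foldl_cons, pvCells, List.foldl_append, List.foldl_map]
    rw [ih]

lemma enum_filter :
    ∀ (row : List Int) (j e : Int),
      ((PySem.List.enumerate row j).filter (fun q => q.1 == e)).map (·.2)
        = if 0 ≤ e - j ∧ e - j < (row.length : Int) then [row.getD (e - j).toNat 0] else [] := by
  intro row
  induction row with
  | nil => intro j e; simp [PySem.List.enumerate_nil]
  | cons x xs ih =>
    intro j e
    rw [PySem.List.enumerate_cons]
    by_cases hj : j = e
    · subst hj
      rw [List.filter_cons_of_pos (by simp), List.map_cons, ih (j + 1) j]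
      rw [if_neg (show ¬(0 ≤ j - (j + 1) ∧ j - (j + 1) < (xs.length : Int)) from by omega)]
      rw [if_pos (show 0 ≤ j - j ∧ j - j < (((x :: xs).length : Nat) : Int) from
        by simp only [List.length_cons]; omega)]
      simp
    · rw [List.filter_cons_of_neg (by simp [hj]), ih (j + 1) e]
      by_cases hc : 0 ≤ e - j ∧ e - j < (((x :: xs).length : Nat) : Int)
      · rw [if_pos (show 0 ≤ e - (j + 1) ∧ e - (j + 1) < (xs.length : Int) from by
          simp only [List.length_cons] at hc; omega), if_pos hc]
        rw [show (e - j).toNat = (e - (j + 1)).toNat + 1 from by omega, List.getD_cons_succ]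
      · rw [if_neg (show ¬(0 ≤ e - (j + 1) ∧ e - (j + 1) < (xs.length : Int)) from by
          simp only [List.length_cons] at hc; omega), if_neg hc]

lemma cells_filter :
    ∀ (rows : List (List Int)) (i d : Int),
      ((pvCells rows i).filter (fun p => p.1 == d)).map (·.2) = pvDiagAux rows i d := by
  intro rows
  induction rows with
  | nil => intro i d; simp [pvCells, pvDiagAux]
  | cons row rest ih =>
    intro i d
    rw [show pvCells (row :: rest) i
        = (PySem.List.enumerate row 0).map (fun q => (i - q.1, q.2)) ++ pvCells rest (i + 1) from rfl]
    rw [List.filter_append, List.map_append, ih (i + 1) d]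
    rw [show pvDiagAux (row :: rest) i d
        = (if 0 ≤ i - d ∧ i - d < (row.length : Int) then [row.getD (i - d).toNat 0] else []) ++
            pvDiagAux rest (i + 1) d from rfl]
    congr 1
    rw [List.filter_map, List.map_map]
    have hp : ((fun p : Int × Int => p.1 == d) ∘ fun q : Int × Int => (i - q.1, q.2))
        = fun q : Int × Int => q.1 == (i - d) := by
      funext q
      simp only [Function.comp_apply]
      by_cases h : q.1 = i - d
      · simp [h]
      · have h2 : ¬ (i - q.1 = d) := by omega
        simp [h, h2]
    rw [hp]
    have := enum_filter row 0 (i - d)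
    simp only [sub_zero] at this
    rw [show ((·.2) ∘ fun q : Int × Int => (i - q.1, q.2)) = (fun q : Int × Int => q.2) from rfl]
    exact this

lemma pvDiagAux_drop :
    ∀ (k : Nat) (rows : List (List Int)) (i d : Int), i - d = -(k : Int) →
      pvDiagAux rows i d = pvDiagAux (rows.drop k) (i + k) d := by
  intro k
  induction k with
  | zero => intro rows i d h; simp
  | succ k ih =>
    intro rows i d h
    cases rows with
    | nil => simp [pvDiagAux]
    | cons row rest =>
      rw [show pvDiagAux (row :: rest) i d
          = (if 0 ≤ i - d ∧ i - d < (row.length : Int) then [row.getD (i - d).toNat 0] else []) ++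
              pvDiagAux rest (i + 1) d from rfl]
      rw [if_neg (by omega), List.nil_append]
      rw [ih rest (i + 1) d (by omega)]
      rw [List.drop_succ_cons]
      congr 1
      omega

lemma pvDiagAux_cut (W : Nat) :
    ∀ (rows : List (List Int)) (i d : Int) (c : Nat),
      i - d = (c : Int) → (∀ row ∈ rows, row.length = W) →
      pvDiagAux rows i d = diagRows (rows.take (W - c)) c := by
  intro rows
  induction rows with
  | nil => intro i d c h hw; simp [pvDiagAux, diagRows]
  | cons row rest ih =>
    intro i d c h hw
    have hlen : row.length = W := hw row (by simp)
    rw [show pvDiagAux (row :: rest) i d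
        = (if 0 ≤ i - d ∧ i - d < (row.length : Int) then [row.getD (i - d).toNat 0] else []) ++
            pvDiagAux rest (i + 1) d from rfl]
    rw [ih (i + 1) d (c + 1) (by omega) (fun r hr => hw r (by simp [hr]))]
    by_cases hcW : c < W
    · rw [if_pos (by rw [hlen]; omega)]
      rw [show W - c = (W - (c + 1)) + 1 from by omega, List.take_succ_cons]
      rw [show diagRows (row :: rest.take (W - (c + 1))) c
          = row.getD c 0 :: diagRows (rest.take (W - (c + 1))) (c + 1) from rfl]
      rw [show (i - d).toNat = c from by omega]
      simp
    · rw [if_neg (by rw [hlen]; omega)]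
      rw [show W - c = 0 from by omega, show W - (c + 1) = 0 from by omega]
      simp [diagRows]

lemma getD_drop (t : List (List Int)) (j k : Nat) :
    (t.drop j).getD k ([] : List Int) = t.getD (j + k) [] := by
  simp [List.getD_eq_getElem?_getD, List.getElem?_drop]

-- loop 1, start row s: the walked diagonal is pvDiagAux table 0 s
lemma big1_eq (table : List (List Int))
    (hrect : ∀ row ∈ table, row.length = (table.headD []).length)
    (hnm : table.length ≤ (table.headD []).length)
    (s : Int) (hs0 : 0 ≤ s) (hs4 : s + 4 ≤ (table.length : Int)) :
    ((PySem.List.pyRange s (table.length : Int) 1).foldl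
      (fun st r =>
        (st.1 ++ [PySem.List.pyGetD (PySem.List.pyGetD table r []) st.2 0], st.2 + 1))
      (([] : List Int), (0 : Int))).1 = pvDiagAux table 0 s := by
  rw [foldl_counter (fun r k => PySem.List.pyGetD (PySem.List.pyGetD table r []) k 0)
    (table.length : Int) ((table.length : Int) - s).toNat s [] 0 rfl]
  simp only [List.nil_append]
  rw [show s = (s.toNat : Int) from by omega]
  rw [pvDiagAux_drop s.toNat table 0 (s.toNat : Int) (by omega)]
  rw [pvDiagAux_cut (table.headD []).length (table.drop s.toNat) (0 + (s.toNat : Int))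
    (s.toNat : Int) 0 (by omega)
    (fun r hr => hrect r (List.mem_of_mem_drop hr))]
  rw [Nat.sub_zero, List.take_of_length_le (by rw [List.length_drop]; omega)]
  rw [← range_diag (table.drop s.toNat) 0]
  rw [PySem.List.pyRange_one, List.map_map, List.length_drop]
  rw [show ((table.length : Int) - (s.toNat : Int)).toNat = table.length - s.toNat from by omega]
  apply List.map_congr_left
  intro k hk
  rw [List.mem_range] at hk
  simp only [Function.comp_apply]
  rw [show (s.toNat : Int) + (k : Int) = ((s.toNat + k : Nat) : Int) from by push_cast; ring]
  rw [show (0 : Int) + (((s.toNat + k : Nat) : Int) - (s.toNat : Int)) = ((k : Nat) : Int) from by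
    push_cast; ring]
  rw [PySem.List.pyGetD_natCast, PySem.List.pyGetD_natCast, getD_drop]
  rw [Nat.zero_add]

-- loop 2, start column sc: the walked diagonal is pvDiagAux table 0 (-sc)
lemma big2_eq (table : List (List Int))
    (hrect : ∀ row ∈ table, row.length = (table.headD []).length)
    (hmn : (table.headD []).length ≤ table.length + 1)
    (sc : Int) (hsc1 : 1 ≤ sc) (hsc : sc + 4 ≤ ((table.headD []).length : Int)) :
    ((PySem.List.pyRange sc ((table.headD []).length : Int) 1).foldl
      (fun st c =>
        (st.1 ++ [PySem.List.pyGetD (PySem.List.pyGetD table st.2 []) c 0], st.2 + 1))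
      (([] : List Int), (0 : Int))).1 = pvDiagAux table 0 (-sc) := by
  rw [foldl_counter (fun c k => PySem.List.pyGetD (PySem.List.pyGetD table k []) c 0)
    ((table.headD []).length : Int) (((table.headD []).length : Int) - sc).toNat sc [] 0 rfl]
  simp only [List.nil_append]
  rw [show sc = (sc.toNat : Int) from by omega]
  rw [pvDiagAux_cut (table.headD []).length table 0 (-(sc.toNat : Int)) sc.toNat (by omega) hrect]
  rw [← range_diag (table.take ((table.headD []).length - sc.toNat)) sc.toNat]
  have hLn : (table.headD []).length - sc.toNat ≤ table.length := by omega
  rw [List.length_take_of_le hLn]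
  rw [PySem.List.pyRange_one, List.map_map]
  rw [show (((table.headD []).length : Int) - (sc.toNat : Int)).toNat
      = (table.headD []).length - sc.toNat from by omega]
  apply List.map_congr_left
  intro k hk
  rw [List.mem_range] at hk
  simp only [Function.comp_apply]
  rw [show (0 : Int) + ((sc.toNat : Int) + (k : Int) - (sc.toNat : Int)) = ((k : Nat) : Int) from by
    ring]
  rw [show (sc.toNat : Int) + (k : Int) = ((sc.toNat + k : Nat) : Int) from by push_cast; ring]
  rw [PySem.List.pyGetD_natCast, PySem.List.pyGetD_natCast]
  congr 1
  rw [List.getD_eq_getElem?_getD, List.getD_eq_getElem?_getD, List.getElem?_take, if_pos hk]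

-- the single diagonal-offset range of B splits into A's two start-index ranges
lemma range_split (n m : Nat) (h1 : 4 ≤ n → n ≤ m) (h2 : 5 ≤ m → m ≤ n + 1) :
    PySem.List.pyRange ((n : Int) - 4) (3 - (m : Int)) (-1)
      = PySem.List.pyRange ((n : Int) - 4) (-1) (-1)
        ++ (PySem.List.pyRange 1 ((m : Int) - 3) 1).map (fun x => -x) := by
  have hpiece : PySem.List.pyRange (-1) (3 - (m : Int)) (-1)
      = (PySem.List.pyRange 1 ((m : Int) - 3) 1).map (fun x => -x) := by
    rw [PySem.List.pyRange_neg_one (-1) (3 - (m : Int)), PySem.List.pyRange_one 1 ((m : Int) - 3),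
      List.map_map]
    rw [show (-1 - (3 - (m : Int))) = ((m : Int) - 3 - 1) from by ring]
    apply List.map_congr_left
    intro k _
    simp only [Function.comp_apply]
    ring
  by_cases hn : 4 ≤ n
  · rw [← hpiece]
    rw [PySem.List.pyRange_neg_one_eq_reverse ((n : Int) - 4) (3 - (m : Int)),
      PySem.List.pyRange_neg_one_eq_reverse ((n : Int) - 4) (-1),
      PySem.List.pyRange_neg_one_eq_reverse (-1) (3 - (m : Int)),
      ← List.reverse_append]
    congr 1
    rw [show (3 - (m : Int)) + 1 = 4 - (m : Int) from by ring]
    rw [show (-1 : Int) + 1 = 0 from by ring]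
    have hm4 : 4 ≤ m := le_trans hn (h1 hn)
    exact PySem.List.pyRange_one_append (4 - (m : Int)) 0 ((n : Int) - 4 + 1) (by omega)
      (by omega)
  · have hm : m ≤ 4 := by
      by_contra h
      have := h2 (by omega)
      omega
    rw [PySem.List.pyRange_neg_one_eq_nil (by omega : (n : Int) - 4 ≤ 3 - (m : Int)),
      PySem.List.pyRange_neg_one_eq_nil (by omega : (n : Int) - 4 ≤ -1),
      PySem.List.pyRange_one_eq_nil (by omega : (m : Int) - 3 ≤ 1)]
    simp

-- ===== VERDICT (by name: the statement is the Claim_ definition above) =====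
theorem get_lowering_diagonal_sequences_py_spec : Claim_equal_get_lowering_diagonal_sequences_py := by
  intro table hdom hpre
  obtain ⟨hne, hshape⟩ := hpre
  unfold Spec_get_lowering_diagonal_sequences_py get_lowering_diagonal_sequences_py
    get_lowering_diagonal_sequences_py_alt
  have h0 : PySem.List.pyGetD table 0 ([] : List Int) = table.headD [] := by
    cases table with
    | nil => exact absurd rfl hne
    | cons a t => simp [PySem.List.pyGetD_zero]
  rw [h0]
  rcases hshape with ⟨hn3, hm4⟩ | ⟨hrect, h1, h2⟩
  · -- degenerate: no diagonal of length ≥ 4 exists; both programs return []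
    rw [PySem.List.pyRange_neg_one_eq_nil
        (by omega : (table.length : Int) - 4 ≤ -1),
      PySem.List.pyRange_one_eq_nil
        (by omega : ((table.headD []).length : Int) - 3 ≤ 1),
      PySem.List.pyRange_neg_one_eq_nil
        (by omega : (table.length : Int) - 4 ≤ 3 - ((table.headD []).length : Int))]
    simp
  rw [PySem.List.foldl_append_singleton_eq_map, PySem.List.foldl_append_singleton_eq_map,
    List.nil_append]
  simp only [buckets_eq table 0 PySem.Dict.empty, PySem.Dict.getD_foldl_modify_append,
    PySem.Dict.getD_empty, List.nil_append, cells_filter]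
  rw [range_split table.length (table.headD []).length h1 h2, List.map_append, List.map_map]
  congr 1
  · apply List.map_congr_left
    intro s hs
    rw [PySem.List.mem_pyRange_neg_one] at hs
    exact big1_eq table hrect (h1 (by omega)) s (by omega) (by omega)
  · apply List.map_congr_left
    intro sc hsc
    rw [PySem.List.mem_pyRange_one] at hsc
    simp only [Function.comp_apply]
    exact big2_eq table hrect (h2 (by omega)) sc (by omega) (by omega)
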